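-- pv_equiv track=rewrite | github.com/cponce-uncc/bioinformatics_tools | extract_s1_data.py | eliminate_blank_data
-- ===== SOURCE A (Python) =====
-- def eliminate_blank_data(coordinate_list, index=1):
--     if index == 1:
--         for item in coordinate_list:
--             if item != '':
--                 return item
--     if index == 2:
--         counter = 0
--         for item in coordinate_list:
--             if item != '':
--                 counter += 1
--                 if counter == 2:
--                     return item
-- ===== SOURCE B (Python) =====
-- def eliminate_blank_data(coordinate_list, index=1):
--     non_blank = [x for x in coordinate_list if x != '']
--     if index == 1 and len(non_blank) >= 1:
--         return non_blank[0]
--     if index == 2 and len(non_blank) >= 2: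
--         return non_blank[1]
-- ===== Notes on version B (the rewrite author's own statement) =====
-- stated objective: simpler
-- what changed: A scans with an early-return loop (and a second loop with an explicit counter for index 2); B builds the filtered non-blank list once and indexes it positionally.
import Mathlib
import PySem

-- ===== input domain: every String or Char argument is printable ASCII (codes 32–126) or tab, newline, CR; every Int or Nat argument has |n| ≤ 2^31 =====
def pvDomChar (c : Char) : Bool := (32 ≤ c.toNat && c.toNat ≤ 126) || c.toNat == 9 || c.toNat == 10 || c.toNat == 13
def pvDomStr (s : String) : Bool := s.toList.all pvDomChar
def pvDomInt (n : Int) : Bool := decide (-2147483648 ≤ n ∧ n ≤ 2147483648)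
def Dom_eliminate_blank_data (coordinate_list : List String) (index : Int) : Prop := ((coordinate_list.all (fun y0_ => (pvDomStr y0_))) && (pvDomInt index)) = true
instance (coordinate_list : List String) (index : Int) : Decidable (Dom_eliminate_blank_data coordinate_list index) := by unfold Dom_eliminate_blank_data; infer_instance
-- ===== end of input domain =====

-- B replaces A's early-return scan (plus counter loop for index 2) by filtering the
-- non-blank elements once and indexing the filtered list; objective: simpler.

-- ===== PORT A =====
-- the 'index == 1' loop: return the first non-blank item
def ebdFirst : List String → Option String
  | [] => none
  | item :: rest => if item ≠ "" then some item else ebdFirst rest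

-- the 'index == 2' loop with its counter
def ebdSecond : List String → Int → Option String
  | [], _ => none
  | item :: rest, counter =>
      if item ≠ "" then
        if counter + 1 = 2 then some item else ebdSecond rest (counter + 1)
      else ebdSecond rest counter

def eliminate_blank_data (coordinate_list : List String) (index : Int) : Option String :=
  if index = 1 then ebdFirst coordinate_list
  else if index = 2 then ebdSecond coordinate_list 0
  else none

-- ===== PORT B =====
def eliminate_blank_data_alt (coordinate_list : List String) (index : Int) : Option String :=
  let non_blank := coordinate_list.filter (fun x => x ≠ "")
  if index = 1 ∧ 1 ≤ non_blank.length then non_blank[0]?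
  else if index = 2 ∧ 2 ≤ non_blank.length then non_blank[1]?
  else none

-- ===== PRECONDITION & SPEC =====
def Spec_eliminate_blank_data (coordinate_list : List String) (index : Int) (out : Option String) : Prop := out = eliminate_blank_data_alt coordinate_list index
instance (coordinate_list : List String) (index : Int) (out : Option String) : Decidable (Spec_eliminate_blank_data coordinate_list index out) := by unfold Spec_eliminate_blank_data; infer_instance

-- ===== CLAIM (what is proved, stated in full; the proofs are below) =====
def Claim_equal_eliminate_blank_data : Prop := ∀ (coordinate_list : List String) (index : Int), Dom_eliminate_blank_data coordinate_list index → Spec_eliminate_blank_data coordinate_list index (eliminate_blank_data coordinate_list index)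

-- ===== LEMMAS AND PROOFS =====
theorem ebdFirst_eq_filter (l : List String) :
    ebdFirst l = (l.filter (fun x => x ≠ ""))[0]? := by
  induction l with
  | nil => rfl
  | cons x xs ih =>
      by_cases hx : x = "" <;> simp [ebdFirst, List.filter, hx, ih]

theorem ebdSecond_one_eq_first (l : List String) :
    ebdSecond l 1 = ebdFirst l := by
  induction l with
  | nil => rfl
  | cons x xs ih =>
      by_cases hx : x = "" <;> simp [ebdSecond, ebdFirst, hx, ih]

theorem ebdSecond_eq_filter (l : List String) :
    ebdSecond l 0 = (l.filter (fun x => x ≠ ""))[1]? := by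
  induction l with
  | nil => rfl
  | cons x xs ih =>
      by_cases hx : x = ""
      · simp [ebdSecond, List.filter, hx, ih]
      · simp [ebdSecond, List.filter, hx, ebdSecond_one_eq_first, ebdFirst_eq_filter]

-- ===== VERDICT (by name: the statement is the Claim_ definition above) =====
theorem eliminate_blank_data_spec : Claim_equal_eliminate_blank_data := by
  intro l i _
  unfold Spec_eliminate_blank_data eliminate_blank_data eliminate_blank_data_alt
  by_cases h1 : i = 1
  · rcases Nat.eq_zero_or_pos (l.filter (fun x => x ≠ "")).length with h | h
    · simp [h1, ebdFirst_eq_filter]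
    · simp [h1, ebdFirst_eq_filter]
  · by_cases h2 : i = 2
    · rcases Nat.lt_or_ge (l.filter (fun x => x ≠ "")).length 2 with h | h
      · simp [h2, ebdSecond_eq_filter]
      · simp [h2, ebdSecond_eq_filter]
    · simp [h1, h2]
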